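-- pv_equiv track=rewrite | github.com/MrBrantCode/unitest_baseline | mut_generate/mist_train_taco/taco_5338/solution.py | calculate_max_tension
-- ===== SOURCE A (Python) =====
-- def calculate_max_tension(N, R, A, B):
--     # Initial maximum tension is the tension from the first exercise
--     max_tension = B[0]
--     current_tension = B[0]
--
--     for j in range(1, N):
--         prev_time = A[j - 1]
--         curr_time = A[j]
--         # Calculate the new tension after relaxation and the next exercise
--         current_tension = max(B[j], current_tension + B[j] - (curr_time - prev_time) * R)
--         # Update the maximum tension if the current tension is higher
--         if current_tension > max_tension:
--             max_tension = current_tension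
--
--     return max_tension
-- ===== SOURCE B (Python) =====
-- def calculate_max_tension(N, R, A, B):
--     n = max(N, 1)
--     # prefix totals: P[j] = sum over steps 1..j of (B[j] - gap*R)
--     P = [0]
--     for j in range(1, n):
--         P.append(P[-1] + B[j] - (A[j] - A[j - 1]) * R)
--     best_start = B[0]          # max over i<=j of B[i] - P[i]
--     ans = B[0]
--     for j in range(1, n):
--         best_start = max(best_start, B[j] - P[j])
--         ans = max(ans, P[j] + best_start)
--     return ans
-- ===== Notes on version B (the rewrite author's own statement) =====
-- stated objective: alternative
-- what changed: Replaces the single Kadane-style running recurrence by precomputing prefix decay totals P and sweeping with a running maximum of the transformed start value B[i]-P[i], taking max of P[j]+best_start.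
import Mathlib
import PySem

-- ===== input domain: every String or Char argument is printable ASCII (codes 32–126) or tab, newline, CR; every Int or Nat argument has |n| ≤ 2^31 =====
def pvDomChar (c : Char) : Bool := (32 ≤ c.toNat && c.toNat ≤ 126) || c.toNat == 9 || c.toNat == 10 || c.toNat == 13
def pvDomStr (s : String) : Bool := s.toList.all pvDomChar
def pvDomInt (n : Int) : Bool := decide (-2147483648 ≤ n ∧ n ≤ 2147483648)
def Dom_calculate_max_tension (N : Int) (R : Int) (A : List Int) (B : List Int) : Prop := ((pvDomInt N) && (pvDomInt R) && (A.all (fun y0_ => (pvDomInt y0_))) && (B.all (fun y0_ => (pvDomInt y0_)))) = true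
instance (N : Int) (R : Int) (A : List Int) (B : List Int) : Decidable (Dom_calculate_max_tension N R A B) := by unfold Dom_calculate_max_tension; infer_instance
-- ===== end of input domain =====

-- B recomputes the same maximum via prefix decay totals P and a running max of B[i]-P[i], instead of A's single Kadane recurrence.

-- ===== PORT A =====
def calculate_max_tension (N : Int) (R : Int) (A : List Int) (B : List Int) : Int :=
  let b0 := PySem.List.pyGetD B 0 0
  let st := (PySem.List.pyRange 1 N 1).foldl (fun (s : Int × Int) j =>
    let prev_time := PySem.List.pyGetD A (j - 1) 0
    let curr_time := PySem.List.pyGetD A j 0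
    let cur := max (PySem.List.pyGetD B j 0)
        (s.2 + PySem.List.pyGetD B j 0 - (curr_time - prev_time) * R)
    (if cur > s.1 then cur else s.1, cur)) (b0, b0)
  st.1

-- ===== PORT B =====
def calculate_max_tension_alt (N : Int) (R : Int) (A : List Int) (B : List Int) : Int :=
  let n := max N 1
  let P := (PySem.List.pyRange 1 n 1).foldl (fun (P : List Int) j =>
    P ++ [PySem.List.pyGetD P (-1) 0 + PySem.List.pyGetD B j 0 -
      (PySem.List.pyGetD A j 0 - PySem.List.pyGetD A (j - 1) 0) * R]) [0]
  let b0 := PySem.List.pyGetD B 0 0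
  let st := (PySem.List.pyRange 1 n 1).foldl (fun (s : Int × Int) j =>
    let best := max s.1 (PySem.List.pyGetD B j 0 - PySem.List.pyGetD P j 0)
    (best, max s.2 (PySem.List.pyGetD P j 0 + best))) (b0, b0)
  st.2

-- ===== PRECONDITION & SPEC =====
-- Pre_ excludes exactly the inputs on which Python A raises IndexError: empty B, or N ≥ 2 exceeding a list length.
def Pre_calculate_max_tension (N : Int) (R : Int) (A : List Int) (B : List Int) : Prop :=
  B ≠ [] ∧ (N ≤ 1 ∨ (N ≤ A.length ∧ N ≤ B.length))
instance (N : Int) (R : Int) (A : List Int) (B : List Int) : Decidable (Pre_calculate_max_tension N R A B) := by unfold Pre_calculate_max_tension; infer_instance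
def pvWitness_calculate_max_tension : Int × Int × List Int × List Int := (3, 2, [0, 2, 5], [5, 1, 4])
def Spec_calculate_max_tension (N : Int) (R : Int) (A : List Int) (B : List Int) (out : Int) : Prop := out = calculate_max_tension_alt N R A B
instance (N : Int) (R : Int) (A : List Int) (B : List Int) (out : Int) : Decidable (Spec_calculate_max_tension N R A B out) := by unfold Spec_calculate_max_tension; infer_instance

-- ===== CLAIM (what is proved, stated in full; the proofs are below) =====
def Claim_equal_calculate_max_tension : Prop := ∀ (N : Int) (R : Int) (A : List Int) (B : List Int), Dom_calculate_max_tension N R A B → Pre_calculate_max_tension N R A B → Spec_calculate_max_tension N R A B (calculate_max_tension N R A B)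

-- ===== LEMMAS AND PROOFS =====

-- the mathematical prefix sequence both loops are about
def pvP (R : Int) (A B : List Int) : Nat → Int
  | 0 => 0
  | k + 1 => pvP R A B k + B.getD (k + 1) 0 - (A.getD (k + 1) 0 - A.getD k 0) * R

-- B's first loop builds exactly [pvP 0, …, pvP m]
theorem pv_buildP (R : Int) (A B : List Int) (m : Nat) :
    (PySem.List.pyRange 1 (1 + (m : Int)) 1).foldl (fun (P : List Int) j =>
      P ++ [PySem.List.pyGetD P (-1) 0 + PySem.List.pyGetD B j 0 -
        (PySem.List.pyGetD A j 0 - PySem.List.pyGetD A (j - 1) 0) * R]) [0]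
    = (List.range (m + 1)).map (pvP R A B) := by
  induction m with
  | zero => simp [PySem.List.pyRange_one_eq_nil, pvP]
  | succ m ih =>
    have hsplit : PySem.List.pyRange 1 (1 + ((m : Int) + 1)) 1
        = PySem.List.pyRange 1 (1 + (m : Int)) 1 ++ [1 + (m : Int)] := by
      have := PySem.List.pyRange_one_succ_right (a := 1) (b := 1 + (m : Int)) (by omega)
      rw [show (1 : Int) + ((m : Int) + 1) = (1 + (m : Int)) + 1 by ring, this]
    push_cast
    rw [hsplit, List.foldl_append, ih]
    simp only [List.foldl]
    have hcast : (1 : Int) + (m : Int) = ((m + 1 : Nat) : Int) := by push_cast; ring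
    have hc2 : ((m + 1 : Nat) : Int) - 1 = ((m : Nat) : Int) := by push_cast; ring
    rw [List.range_succ, List.map_append, List.map_singleton]
    rw [List.append_assoc]
    rw [PySem.List.pyGetD_neg_one_append_singleton]
    rw [hcast, hc2]
    simp only [PySem.List.pyGetD_natCast]
    simp [pvP, List.range_succ]

-- coupled invariant for A's Kadane loop and B's second sweep
theorem pv_sweep (R : Int) (A B : List Int) (n : Nat) (m : Nat) (hm : m < n) :
    (((PySem.List.pyRange 1 (1 + (m : Int)) 1).foldl (fun (s : Int × Int) j =>
        (if max (PySem.List.pyGetD B j 0)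
            (s.2 + PySem.List.pyGetD B j 0 - (PySem.List.pyGetD A j 0 - PySem.List.pyGetD A (j - 1) 0) * R) > s.1
          then max (PySem.List.pyGetD B j 0)
            (s.2 + PySem.List.pyGetD B j 0 - (PySem.List.pyGetD A j 0 - PySem.List.pyGetD A (j - 1) 0) * R)
          else s.1,
         max (PySem.List.pyGetD B j 0)
            (s.2 + PySem.List.pyGetD B j 0 - (PySem.List.pyGetD A j 0 - PySem.List.pyGetD A (j - 1) 0) * R)))
        (PySem.List.pyGetD B 0 0, PySem.List.pyGetD B 0 0)).1
      = ((PySem.List.pyRange 1 (1 + (m : Int)) 1).foldl (fun (s : Int × Int) j =>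
        (max s.1 (PySem.List.pyGetD B j 0 - PySem.List.pyGetD ((List.range n).map (pvP R A B)) j 0),
         max s.2 (PySem.List.pyGetD ((List.range n).map (pvP R A B)) j 0 +
           max s.1 (PySem.List.pyGetD B j 0 - PySem.List.pyGetD ((List.range n).map (pvP R A B)) j 0))))
          (PySem.List.pyGetD B 0 0, PySem.List.pyGetD B 0 0)).2)
    ∧ (((PySem.List.pyRange 1 (1 + (m : Int)) 1).foldl (fun (s : Int × Int) j =>
        (if max (PySem.List.pyGetD B j 0)
            (s.2 + PySem.List.pyGetD B j 0 - (PySem.List.pyGetD A j 0 - PySem.List.pyGetD A (j - 1) 0) * R) > s.1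
          then max (PySem.List.pyGetD B j 0)
            (s.2 + PySem.List.pyGetD B j 0 - (PySem.List.pyGetD A j 0 - PySem.List.pyGetD A (j - 1) 0) * R)
          else s.1,
         max (PySem.List.pyGetD B j 0)
            (s.2 + PySem.List.pyGetD B j 0 - (PySem.List.pyGetD A j 0 - PySem.List.pyGetD A (j - 1) 0) * R)))
        (PySem.List.pyGetD B 0 0, PySem.List.pyGetD B 0 0)).2
      = pvP R A B m + ((PySem.List.pyRange 1 (1 + (m : Int)) 1).foldl (fun (s : Int × Int) j =>
        (max s.1 (PySem.List.pyGetD B j 0 - PySem.List.pyGetD ((List.range n).map (pvP R A B)) j 0),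
         max s.2 (PySem.List.pyGetD ((List.range n).map (pvP R A B)) j 0 +
           max s.1 (PySem.List.pyGetD B j 0 - PySem.List.pyGetD ((List.range n).map (pvP R A B)) j 0))))
          (PySem.List.pyGetD B 0 0, PySem.List.pyGetD B 0 0)).1) := by
  induction m with
  | zero => simp [PySem.List.pyRange_one_eq_nil, pvP]
  | succ m ih =>
    have ih := ih (by omega)
    have hsplit : PySem.List.pyRange 1 (1 + ((m : Int) + 1)) 1
        = PySem.List.pyRange 1 (1 + (m : Int)) 1 ++ [1 + (m : Int)] := by
      have := PySem.List.pyRange_one_succ_right (a := 1) (b := 1 + (m : Int)) (by omega)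
      rw [show (1 : Int) + ((m : Int) + 1) = (1 + (m : Int)) + 1 by ring, this]
    have hcast : (1 : Int) + (m : Int) = ((m + 1 : Nat) : Int) := by push_cast; ring
    have hc2 : ((m + 1 : Nat) : Int) - 1 = ((m : Nat) : Int) := by push_cast; ring
    have hP : PySem.List.pyGetD ((List.range n).map (pvP R A B)) ((m + 1 : Nat) : Int) 0
        = pvP R A B (m + 1) := by
      rw [PySem.List.pyGetD_natCast]
      simp [List.getD, hm]
    push_cast
    rw [hsplit, List.foldl_append, List.foldl_append]
    simp only [List.foldl]
    rw [hcast, hc2, hP]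
    simp only [PySem.List.pyGetD_natCast]
    obtain ⟨h1, h2⟩ := ih
    rw [hcast] at h1 h2
    constructor
    · rw [h1, h2]
      have hrec : pvP R A B (m + 1)
          = pvP R A B m + B.getD (m + 1) 0 - (A.getD (m + 1) 0 - A.getD m 0) * R := rfl
      split_ifs <;> omega
    · rw [h2]
      have hrec : pvP R A B (m + 1)
          = pvP R A B m + B.getD (m + 1) 0 - (A.getD (m + 1) 0 - A.getD m 0) * R := rfl
      omega

-- ===== VERDICT (by name: the statement is the Claim_ definition above) =====
theorem calculate_max_tension_spec : Claim_equal_calculate_max_tension := by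
  intro N R A B _ _
  unfold Spec_calculate_max_tension calculate_max_tension calculate_max_tension_alt
  by_cases hN : N ≤ 1
  · have h1 : PySem.List.pyRange 1 N 1 = [] := PySem.List.pyRange_one_eq_nil hN
    have h2 : max N 1 = 1 := by omega
    simp [h1, h2, PySem.List.pyRange_one_eq_nil]
  · have hn : max N 1 = N := by omega
    have hm : N = 1 + ((N.toNat - 1 : Nat) : Int) := by omega
    rw [hn, hm]
    simp only [pv_buildP]
    exact (pv_sweep R A B (N.toNat - 1 + 1) (N.toNat - 1) (by omega)).1
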